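-- pv_equiv track=rewrite | github.com/laibao-ai-token/tradecat | services/signal-service/src/backtest/comparison.py | _normalize_counter
-- ===== SOURCE A (Python) =====
-- def _normalize_counter(raw: dict[str, int] | None) -> dict[str, int]:
--     out: dict[str, int] = {}
--     for key, value in (raw or {}).items():
--         norm_key = str(key).strip()
--         if not norm_key:
--             continue
--         out[norm_key] = out.get(norm_key, 0) + int(value)
--     return dict(sorted(out.items(), key=lambda item: (-item[1], item[0])))
-- ===== SOURCE B (Python) =====
-- def _normalize_counter(raw):
--     pairs = sorted((key.strip(), int(value)) for key, value in (raw or {}).items() if key.strip())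
--     grouped = []
--     i = 0
--     n = len(pairs)
--     while i < n:
--         k = pairs[i][0]
--         total = 0
--         while i < n and pairs[i][0] == k:
--             total += pairs[i][1]
--             i += 1
--         grouped.append((k, total))
--     return dict(sorted(grouped, key=lambda item: (-item[1], item[0])))
-- ===== Notes on version B (the rewrite author's own statement) =====
-- stated objective: alternative
-- what changed: Aggregation by incremental dict lookups is replaced by a sort-then-scan: build the (stripped key, value) pairs once, sort them, and sum each adjacent run of equal keys in a single index scan; the final (-count, key) sort is unchanged.
import Mathlib
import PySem

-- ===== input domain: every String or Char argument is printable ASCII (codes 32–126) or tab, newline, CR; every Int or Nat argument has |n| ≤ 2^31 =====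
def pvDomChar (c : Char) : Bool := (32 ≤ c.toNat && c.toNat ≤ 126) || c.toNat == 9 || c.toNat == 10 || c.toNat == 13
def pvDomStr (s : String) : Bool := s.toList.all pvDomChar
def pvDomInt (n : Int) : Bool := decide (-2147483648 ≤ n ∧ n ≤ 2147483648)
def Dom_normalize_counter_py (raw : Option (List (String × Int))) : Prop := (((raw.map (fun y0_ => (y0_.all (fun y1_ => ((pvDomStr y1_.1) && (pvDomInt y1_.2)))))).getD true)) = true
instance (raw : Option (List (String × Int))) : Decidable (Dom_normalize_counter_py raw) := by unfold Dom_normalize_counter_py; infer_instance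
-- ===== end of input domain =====

-- B replaces A's incremental dict aggregation by a sort-then-scan over the stripped (key, value)
-- pairs (summing each adjacent run of equal keys); the final (-count, key) sort is unchanged.

-- ===== PORT A =====
def normalize_counter_py (raw : Option (List (String × Int))) : List (String × Int) :=
  let out := (raw.getD []).foldl (fun d p =>
      let nk := PySem.Str.strip p.1
      if nk = "" then d else d.insert nk (d.getD nk 0 + p.2)) PySem.Dict.empty
  PySem.List.sorted2 out.items (fun p => -p.2) (fun p => p.1) false

-- ===== PORT B =====
-- inner 'while i < n and pairs[i][0] == k' loop: returns (sum of the run's values, remaining suffix)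
def takeRunB (k : String) : List (String × Int) → Int × List (String × Int)
  | [] => (0, [])
  | (k', v) :: t =>
      if k' = k then
        let r := takeRunB k t
        (v + r.1, r.2)
      else (0, (k', v) :: t)

theorem takeRunB_length (k : String) : ∀ t : List (String × Int), (takeRunB k t).2.length ≤ t.length := by
  intro t
  induction t with
  | nil => simp [takeRunB]
  | cons p t ih =>
      obtain ⟨k', v⟩ := p
      by_cases h : k' = k <;> simp [takeRunB, h]
      omega

-- outer 'while i < n' loop over pairs, one entry appended per run
def runsB : List (String × Int) → List (String × Int)
  | [] => []
  | (k, v) :: t => (k, v + (takeRunB k t).1) :: runsB (takeRunB k t).2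
termination_by l => l.length
decreasing_by
  exact Nat.lt_succ_of_le (takeRunB_length k t)

def normalize_counter_py_alt (raw : Option (List (String × Int))) : List (String × Int) :=
  let pairs := PySem.List.sorted2
      (((raw.getD []).map (fun p => (PySem.Str.strip p.1, p.2))).filter (fun p => decide (p.1 ≠ "")))
      (fun p => p.1) (fun p => p.2) false
  PySem.List.sorted2 (runsB pairs) (fun p => -p.2) (fun p => p.1) false

-- ===== PRECONDITION & SPEC =====
def Spec_normalize_counter_py (raw : Option (List (String × Int))) (out : List (String × Int)) : Prop := out = normalize_counter_py_alt raw
instance (raw : Option (List (String × Int))) (out : List (String × Int)) : Decidable (Spec_normalize_counter_py raw out) := by unfold Spec_normalize_counter_py; infer_instance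

-- ===== CLAIM (what is proved, stated in full; the proofs are below) =====
def Claim_equal_normalize_counter_py : Prop := ∀ (raw : Option (List (String × Int))), Dom_normalize_counter_py raw → Spec_normalize_counter_py raw (normalize_counter_py raw)

-- ===== LEMMAS AND PROOFS =====

-- value sum of all pairs in l whose key is k
def pvSV (l : List (String × Int)) (k : String) : Int :=
  ((l.filter (fun p => p.1 == k)).map Prod.snd).sum

-- the stripped, nonempty-key pairs both programs aggregate
def pvPairs (l : List (String × Int)) : List (String × Int) :=
  (l.map (fun p => (PySem.Str.strip p.1, p.2))).filter (fun p => decide (p.1 ≠ ""))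


-- sorted2's insertion order: ascending in the lexicographic (k1, k2) key
theorem pv_R_trans {α κ₁ κ₂ : Type} [LinearOrder κ₁] [LinearOrder κ₂]
    (k1 : α → κ₁) (k2 : α → κ₂) (a b c : α)
    (hab : k1 a < k1 b ∨ (k1 a = k1 b ∧ k2 a ≤ k2 b))
    (hbc : k1 b < k1 c ∨ (k1 b = k1 c ∧ k2 b ≤ k2 c)) :
    k1 a < k1 c ∨ (k1 a = k1 c ∧ k2 a ≤ k2 c) := by
  rcases hab with h1 | ⟨h1, h1'⟩ <;> rcases hbc with h2 | ⟨h2, h2'⟩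
  · exact Or.inl (h1.trans h2)
  · exact Or.inl (h2 ▸ h1)
  · exact Or.inl (h1 ▸ h2)
  · exact Or.inr ⟨h1.trans h2, h1'.trans h2'⟩

theorem pv_B_true {α κ₁ κ₂ : Type} [LinearOrder κ₁] [LinearOrder κ₂]
    (k1 : α → κ₁) (k2 : α → κ₂) (a b : α)
    (h : (decide (k1 a < k1 b) || (!decide (k1 b < k1 a) && decide (k2 a < k2 b))) = true) :
    k1 a < k1 b ∨ (k1 a = k1 b ∧ k2 a ≤ k2 b) := by
  simp only [Bool.or_eq_true, Bool.and_eq_true, Bool.not_eq_true', decide_eq_true_eq,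
    decide_eq_false_iff_not] at h
  rcases h with h | ⟨h1, h2⟩
  · exact Or.inl h
  · rcases lt_or_ge (k1 a) (k1 b) with hl | hg
    · exact Or.inl hl
    · exact Or.inr ⟨le_antisymm (le_of_not_gt h1) hg |>.symm ▸ rfl, le_of_lt h2⟩

theorem pv_B_false {α κ₁ κ₂ : Type} [LinearOrder κ₁] [LinearOrder κ₂]
    (k1 : α → κ₁) (k2 : α → κ₂) (a b : α)
    (h : (decide (k1 a < k1 b) || (!decide (k1 b < k1 a) && decide (k2 a < k2 b))) = false) :
    k1 b < k1 a ∨ (k1 b = k1 a ∧ k2 b ≤ k2 a) := by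
  simp only [Bool.or_eq_false_iff, Bool.and_eq_false_iff, Bool.not_eq_false', decide_eq_true_eq,
    decide_eq_false_iff_not] at h
  obtain ⟨h1, h2⟩ := h
  rcases lt_trichotomy (k1 a) (k1 b) with hl | he | hg
  · exact absurd hl h1
  · rcases h2 with h2 | h2
    · exact Or.inl h2
    · exact Or.inr ⟨he.symm, not_lt.mp h2⟩
  · exact Or.inl hg

theorem pv_insertBy_pairwise {α κ₁ κ₂ : Type} [LinearOrder κ₁] [LinearOrder κ₂]
    (k1 : α → κ₁) (k2 : α → κ₂) (x : α) :
    ∀ ys : List α, ys.Pairwise (fun a b => k1 a < k1 b ∨ (k1 a = k1 b ∧ k2 a ≤ k2 b)) →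
      (PySem.List.insertBy (fun a b => decide (k1 a < k1 b) || (!decide (k1 b < k1 a) && decide (k2 a < k2 b))) x ys).Pairwise
        (fun a b => k1 a < k1 b ∨ (k1 a = k1 b ∧ k2 a ≤ k2 b)) := by
  intro ys
  induction ys with
  | nil => intro _; simp [PySem.List.insertBy]
  | cons y t ih =>
      intro h
      rw [List.pairwise_cons] at h
      obtain ⟨hy, ht⟩ := h
      rw [PySem.List.insertBy]
      by_cases hb : (decide (k1 x < k1 y) || (!decide (k1 y < k1 x) && decide (k2 x < k2 y))) = true
      · rw [if_pos hb]
        refine List.pairwise_cons.mpr ⟨?_, List.pairwise_cons.mpr ⟨hy, ht⟩⟩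
        intro z hz
        rcases List.mem_cons.mp hz with rfl | hz
        · exact pv_B_true k1 k2 x z hb
        · exact pv_R_trans k1 k2 x y z (pv_B_true k1 k2 x y hb) (hy z hz)
      · rw [if_neg hb]
        refine List.pairwise_cons.mpr ⟨?_, ih ht⟩
        intro z hz
        rcases (PySem.List.mem_insertBy _ x z t).mp hz with rfl | hz
        · exact pv_B_false k1 k2 z y (Bool.eq_false_iff.mpr hb)
        · exact hy z hz

theorem pv_foldl_insertBy_pairwise {α κ₁ κ₂ : Type} [LinearOrder κ₁] [LinearOrder κ₂]
    (k1 : α → κ₁) (k2 : α → κ₂) :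
    ∀ (xs acc : List α), acc.Pairwise (fun a b => k1 a < k1 b ∨ (k1 a = k1 b ∧ k2 a ≤ k2 b)) →
      (xs.foldl (fun acc x => PySem.List.insertBy (fun a b => decide (k1 a < k1 b) || (!decide (k1 b < k1 a) && decide (k2 a < k2 b))) x acc) acc).Pairwise
        (fun a b => k1 a < k1 b ∨ (k1 a = k1 b ∧ k2 a ≤ k2 b)) := by
  intro xs
  induction xs with
  | nil => intro acc h; simpa using h
  | cons x t ih =>
      intro acc h
      simpa [List.foldl_cons] using ih _ (pv_insertBy_pairwise k1 k2 x acc h)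

theorem pv_sorted2_pairwise {α κ₁ κ₂ : Type} [LinearOrder κ₁] [LinearOrder κ₂]
    (xs : List α) (k1 : α → κ₁) (k2 : α → κ₂) :
    (PySem.List.sorted2 xs k1 k2 false).Pairwise
      (fun a b => k1 a < k1 b ∨ (k1 a = k1 b ∧ k2 a ≤ k2 b)) := by
  exact pv_foldl_insertBy_pairwise k1 k2 xs [] List.Pairwise.nil

theorem pv_sorted2_eq_of_perm {α κ₁ κ₂ : Type} [LinearOrder κ₁] [LinearOrder κ₂]
    (xs ys : List α) (k1 : α → κ₁) (k2 : α → κ₂)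
    (hinj : ∀ a b, k1 a = k1 b → k2 a = k2 b → a = b) (h : xs.Perm ys) :
    PySem.List.sorted2 xs k1 k2 false = PySem.List.sorted2 ys k1 k2 false := by
  refine List.Perm.eq_of_pairwise ?_ (pv_sorted2_pairwise xs k1 k2) (pv_sorted2_pairwise ys k1 k2)
    (((PySem.List.sorted2_perm xs k1 k2 false).trans h).trans (PySem.List.sorted2_perm ys k1 k2 false).symm)
  intro a b _ _ hab hba
  rcases hab with h1 | ⟨h1, h1'⟩ <;> rcases hba with h2 | ⟨h2, h2'⟩
  · exact absurd h2 (not_lt_of_gt h1)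
  · exact absurd h1 (h2 ▸ lt_irrefl _)
  · exact absurd h2 (h1 ▸ lt_irrefl _)
  · exact hinj a b h1 (le_antisymm h1' h2')

-- ---- pvSV arithmetic ----
theorem pvSV_cons (k' : String) (v : Int) (t : List (String × Int)) (k : String) :
    pvSV ((k', v) :: t) k = if k' = k then v + pvSV t k else pvSV t k := by
  by_cases h : k' = k <;> simp [pvSV, h]

theorem pvSV_append (l₁ l₂ : List (String × Int)) (k : String) :
    pvSV (l₁ ++ l₂) k = pvSV l₁ k + pvSV l₂ k := by
  simp [pvSV, List.filter_append]

theorem pvSV_eq_zero (l : List (String × Int)) (k : String) (h : ∀ p ∈ l, p.1 ≠ k) :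
    pvSV l k = 0 := by
  have : l.filter (fun p => p.1 == k) = [] := by
    rw [List.filter_eq_nil_iff]; intro p hp; simpa using h p hp
  simp [pvSV, this]

theorem pvSV_all (l : List (String × Int)) (k : String) (h : ∀ p ∈ l, p.1 = k) :
    pvSV l k = (l.map Prod.snd).sum := by
  have : l.filter (fun p => p.1 == k) = l := by
    rw [List.filter_eq_self]; intro p hp; simpa using h p hp
  simp [pvSV, this]

theorem pvSV_perm (l₁ l₂ : List (String × Int)) (k : String) (h : l₁.Perm l₂) :
    pvSV l₁ k = pvSV l₂ k :=
  ((h.filter _).map _).sum_eq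

-- ---- A's loop, rewritten over the filtered pair list ----
theorem pv_foldA (l : List (String × Int)) : ∀ d : PySem.Dict String Int,
    l.foldl (fun d p =>
        let nk := PySem.Str.strip p.1
        if nk = "" then d else d.insert nk (d.getD nk 0 + p.2)) d
      = (pvPairs l).foldl (fun d p => d.insert p.1 (d.getD p.1 0 + p.2)) d := by
  induction l with
  | nil => intro d; simp [pvPairs]
  | cons p t ih =>
      intro d
      by_cases h : PySem.Str.strip p.1 = "" <;>
        simp [pvPairs, h, ih] at ih ⊢

theorem pv_getD_foldG : ∀ (l : List (String × Int)) (d : PySem.Dict String Int) (k : String),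
    ((l.foldl (fun d p => d.insert p.1 (d.getD p.1 0 + p.2)) d).getD k 0) = d.getD k 0 + pvSV l k := by
  intro l
  induction l with
  | nil => intro d k; simp [pvSV]
  | cons p t ih =>
      intro d k
      obtain ⟨k', v⟩ := p
      rw [List.foldl_cons, ih, pvSV_cons, PySem.Dict.getD_insert]
      by_cases h : k = k'
      · subst h; simp; ring
      · rw [if_neg h, if_neg (fun hh : k' = k => h hh.symm)]

-- ---- takeRunB is takeWhile-sum / dropWhile ----
theorem pv_takeRunB (k : String) : ∀ t : List (String × Int),
    takeRunB k t = (((t.takeWhile (fun p => p.1 == k)).map Prod.snd).sum,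
                    t.dropWhile (fun p => p.1 == k)) := by
  intro t
  induction t with
  | nil => simp [takeRunB]
  | cons p t ih =>
      obtain ⟨k', v⟩ := p
      by_cases h : k' = k <;> simp [takeRunB, h, ih]

theorem pv_dropWhile_lt (k : String) : ∀ t : List (String × Int),
    t.Pairwise (fun a b => a.1 ≤ b.1) → (∀ p ∈ t, k ≤ p.1) →
    ∀ p ∈ t.dropWhile (fun p => p.1 == k), k < p.1 := by
  intro t
  induction t with
  | nil => simp
  | cons q t ih =>
      intro hpw hk
      rw [List.pairwise_cons] at hpw
      by_cases h : q.1 = k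
      · rw [List.dropWhile_cons_of_pos (by simpa using h)]
        exact ih hpw.2 (fun p hp => hk p (List.mem_cons_of_mem _ hp))
      · rw [List.dropWhile_cons_of_neg (by simpa using h)]
        intro p hp
        have hq : k < q.1 := lt_of_le_of_ne (hk q (List.mem_cons_self ..)) (Ne.symm h)
        rcases List.mem_cons.mp hp with rfl | hp
        · exact hq
        · exact lt_of_lt_of_le hq (hpw.1 p hp)

-- ---- the scan over a key-sorted list: distinct keys, same key set, per-key sums ----
theorem pv_runsB_facts : ∀ (n : Nat) (zs : List (String × Int)), zs.length ≤ n →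
    zs.Pairwise (fun a b => a.1 ≤ b.1) →
    ((runsB zs).map Prod.fst).Nodup ∧
    (∀ k, k ∈ (runsB zs).map Prod.fst ↔ k ∈ zs.map Prod.fst) ∧
    (∀ p ∈ runsB zs, p.2 = pvSV zs p.1) := by
  intro n
  induction n with
  | zero =>
      intro zs hlen _
      have : zs = [] := List.eq_nil_of_length_eq_zero (Nat.le_zero.mp hlen)
      subst this
      simp [runsB]
  | succ n ih =>
      intro zs hlen hpw
      match zs with
      | [] => simp [runsB]
      | (k, v) :: t =>
        rw [List.pairwise_cons] at hpw
        have hk : ∀ p ∈ t, k ≤ p.1 := fun p hp => hpw.1 p hp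
        set tw := t.takeWhile (fun p => p.1 == k) with htw_def
        set rest := t.dropWhile (fun p => p.1 == k) with hrest_def
        have htsplit : tw ++ rest = t := List.takeWhile_append_dropWhile
        have htw : ∀ p ∈ tw, p.1 = k := fun p hp => by
          simpa using List.mem_takeWhile_imp hp
        have hrest_lt : ∀ p ∈ rest, k < p.1 := pv_dropWhile_lt k t hpw.2 hk
        have hrest_pw : rest.Pairwise (fun a b => a.1 ≤ b.1) :=
          hpw.2.sublist (List.dropWhile_sublist _)
        have hrest_len : rest.length ≤ n := by
          have h1 : rest.length ≤ t.length := (List.dropWhile_sublist _).length_le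
          simp at hlen; omega
        obtain ⟨ihnd, ihmem, ihval⟩ := ih rest hrest_len hrest_pw
        have hruns : runsB ((k, v) :: t) = (k, v + (tw.map Prod.snd).sum) :: runsB rest := by
          rw [runsB, pv_takeRunB]
        have hmemt : ∀ k', k' ∈ t.map Prod.fst ↔ (k' = k ∧ tw ≠ []) ∨ k' ∈ rest.map Prod.fst := by
          intro k'
          rw [← htsplit]
          simp only [List.map_append, List.mem_append, List.mem_map]
          constructor
          · rintro (⟨p, hp, rfl⟩ | h)
            · exact Or.inl ⟨htw p hp, fun he => by simp [he] at hp⟩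
            · exact Or.inr (by simpa using h)
          · rintro (⟨rfl, hne⟩ | h)
            · obtain ⟨p, hp⟩ := List.exists_mem_of_ne_nil tw hne
              exact Or.inl ⟨p, hp, htw p hp⟩
            · exact Or.inr (by simpa using h)
        refine ⟨?_, ?_, ?_⟩
        · rw [hruns]
          simp only [List.map_cons, List.nodup_cons]
          refine ⟨fun hmem => ?_, ihnd⟩
          obtain ⟨p, hp, hpk⟩ := List.mem_map.mp ((ihmem k).mp hmem)
          exact absurd (hpk ▸ hrest_lt p hp) (lt_irrefl k)
        · intro k'
          rw [hruns]
          simp only [List.map_cons, List.mem_cons, ihmem k', hmemt k']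
          constructor
          · rintro (rfl | h)
            · exact Or.inl rfl
            · exact Or.inr (Or.inr h)
          · rintro (rfl | ⟨rfl, _⟩ | h)
            · exact Or.inl rfl
            · exact Or.inl rfl
            · exact Or.inr h
        · intro p hp
          rw [hruns] at hp
          rcases List.mem_cons.mp hp with rfl | hp
          · show v + (tw.map Prod.snd).sum = pvSV ((k, v) :: t) k
            rw [pvSV_cons, if_pos rfl, ← htsplit, pvSV_append,
              pvSV_all tw k htw,
              pvSV_eq_zero rest k (fun p hp => ne_of_gt (hrest_lt p hp))]
            ring
          · have hv := ihval p hp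
            have hpfst : p.1 ∈ rest.map Prod.fst :=
              (ihmem p.1).mp (List.mem_map.mpr ⟨p, hp, rfl⟩)
            obtain ⟨q, hq, hqk⟩ := List.mem_map.mp hpfst
            have hne : p.1 ≠ k := hqk ▸ ne_of_gt (hrest_lt q hq)
            rw [hv]
            show pvSV rest p.1 = pvSV ((k, v) :: t) p.1
            rw [pvSV_cons, if_neg (fun he => hne he.symm), ← htsplit, pvSV_append,
              pvSV_eq_zero tw p.1 (fun q hq => (htw q hq).symm ▸ fun he => hne he.symm)]
            ring

-- ---- assembly: A's sorted items = B's sorted run-scan ----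
theorem pv_main (l : List (String × Int)) :
    PySem.List.sorted2
      ((l.foldl (fun d p =>
          let nk := PySem.Str.strip p.1
          if nk = "" then d else d.insert nk (d.getD nk 0 + p.2)) PySem.Dict.empty).items)
      (fun p => -p.2) (fun p => p.1) false
    = PySem.List.sorted2
        (runsB (PySem.List.sorted2 (pvPairs l) (fun p => p.1) (fun p => p.2) false))
        (fun p => -p.2) (fun p => p.1) false := by
  rw [pv_foldA]
  set P := pvPairs l with hP
  set out := P.foldl (fun d p => d.insert p.1 (d.getD p.1 0 + p.2)) PySem.Dict.empty with hout
  set zs := PySem.List.sorted2 P (fun p => p.1) (fun p => p.2) false with hzs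
  have hzp : zs.Perm P := PySem.List.sorted2_perm P _ _ false
  have hzs_pw : zs.Pairwise (fun a b => a.1 ≤ b.1) := by
    refine (pv_sorted2_pairwise P (fun p => p.1) (fun p => p.2)).imp ?_
    rintro a b (h | ⟨h, _⟩)
    · exact le_of_lt h
    · exact le_of_eq h
  obtain ⟨hnd, hmem, hval⟩ := pv_runsB_facts zs.length zs le_rfl hzs_pw
  have hkeys : out.keys = PySem.Set.update [] (P.map Prod.fst) := by
    rw [hout, PySem.Dict.keys_foldl_insert_key P Prod.fst (fun d x => d.getD x.1 0 + x.2),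
      PySem.Dict.keys_empty]
  have hknd : out.keys.Nodup := by
    rw [hout]
    exact PySem.Dict.nodup_keys_foldl_insert_key P Prod.fst _ _ (by simp [PySem.Dict.keys_empty])
  have hgetD : ∀ k, out.getD k 0 = pvSV P k := by
    intro k
    rw [hout, pv_getD_foldG, PySem.Dict.getD_empty, zero_add]
  have hitems : out.items = out.keys.map (fun k => (k, pvSV P k)) := by
    rw [PySem.Dict.items_eq_map_keys out hknd 0]
    exact List.map_congr_left (fun k _ => by rw [hgetD])
  have hgrouped : runsB zs = ((runsB zs).map Prod.fst).map (fun k => (k, pvSV P k)) := by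
    rw [List.map_map]
    conv_lhs => rw [← List.map_id (runsB zs)]
    refine List.map_congr_left ?_
    intro p hp
    have h1 := hval p hp
    have h2 : pvSV zs p.1 = pvSV P p.1 := pvSV_perm _ _ _ hzp
    obtain ⟨a, b⟩ := p
    simp only [id, Function.comp]
    exact Prod.ext rfl (h1.trans h2)
  have hkeysperm : out.keys.Perm ((runsB zs).map Prod.fst) := by
    rw [List.perm_ext_iff_of_nodup hknd hnd]
    intro a
    rw [hkeys, hmem a, (hzp.map Prod.fst).mem_iff]
    simp [PySem.Set.mem_update]
  refine pv_sorted2_eq_of_perm _ _ _ _ ?_ ?_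
  · intro a b h1 h2
    exact Prod.ext h2 (by omega)
  · rw [hitems, hgrouped]
    exact hkeysperm.map _

-- ===== VERDICT (by name: the statement is the Claim_ definition above) =====
theorem normalize_counter_py_spec : Claim_equal_normalize_counter_py := by
  intro raw _
  show normalize_counter_py raw = normalize_counter_py_alt raw
  exact pv_main (raw.getD [])
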